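-- pv_equiv track=rewrite | github.com/YaraYou/reply-simple-wechat | data_pipeline/parse_chats.py | build_multi_turn_examples
-- ===== SOURCE A (Python) =====
-- def build_multi_turn_examples(pairs, window=3):
--     examples = []
--     for i in range(len(pairs) - window + 1):
--         block = pairs[i : i + window]
--         lines = []
--         for user, assistant in block:
--             lines.append(f"对方：{user}")
--             lines.append(f"我：{assistant}")
--         examples.append("\n".join(lines))
--     return examples
-- ===== SOURCE B (Python) =====
-- def build_multi_turn_examples(pairs, window=3):
--     n_windows = len(pairs) - window + 1
--     if n_windows <= 0:
--         return []
--     blocks = [f"对方：{user}\n我：{assistant}" for user, assistant in pairs]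
--     return ["\n".join(blocks[i : i + window]) for i in range(n_windows)]
-- ===== Notes on version B (the rewrite author's own statement) =====
-- stated objective: simpler
-- what changed: B formats each pair once into a precomputed blocks list and produces the output as windowed joins of slices of that list, instead of A's nested loop that re-unpacks and re-formats every pair inside each window.
import Mathlib
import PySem

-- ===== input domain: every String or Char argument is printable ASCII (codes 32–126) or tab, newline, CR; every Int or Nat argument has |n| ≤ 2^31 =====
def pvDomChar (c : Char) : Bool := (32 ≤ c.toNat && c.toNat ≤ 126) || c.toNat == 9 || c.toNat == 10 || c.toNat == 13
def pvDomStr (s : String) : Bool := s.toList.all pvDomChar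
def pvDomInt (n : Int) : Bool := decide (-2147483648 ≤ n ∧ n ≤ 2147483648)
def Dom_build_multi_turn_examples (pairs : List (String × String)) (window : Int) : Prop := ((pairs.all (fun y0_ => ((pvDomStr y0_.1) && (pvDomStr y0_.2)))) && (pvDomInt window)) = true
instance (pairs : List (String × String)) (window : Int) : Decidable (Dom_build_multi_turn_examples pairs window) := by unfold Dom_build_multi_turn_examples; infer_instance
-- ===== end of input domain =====

-- B formats each pair once and reshapes with windowed joins, instead of A's nested per-window re-formatting; objective: simpler.

-- ===== PORT A =====
def build_multi_turn_examples (pairs : List (String × String)) (window : Int) : List String :=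
  (PySem.List.pyRange 0 ((pairs.length : Int) - window + 1) 1).foldl (fun examples i =>
    let block := PySem.List.slice pairs (some i) (some (i + window))
    let lines := block.foldl (fun lines p =>
      (lines ++ ["对方：" ++ p.1]) ++ ["我：" ++ p.2]) ([] : List String)
    examples ++ [PySem.Str.join "\n" lines]) []

-- ===== PORT B =====
def build_multi_turn_examples_alt (pairs : List (String × String)) (window : Int) : List String :=
  let nWindows : Int := (pairs.length : Int) - window + 1
  if nWindows ≤ 0 then []
  else
    let blocks := pairs.map (fun p => "对方：" ++ p.1 ++ "\n我：" ++ p.2)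
    (PySem.List.pyRange 0 nWindows 1).map (fun i =>
      PySem.Str.join "\n" (PySem.List.slice blocks (some i) (some (i + window))))

-- ===== PRECONDITION & SPEC =====
def Spec_build_multi_turn_examples (pairs : List (String × String)) (window : Int) (out : List String) : Prop := out = build_multi_turn_examples_alt pairs window
instance (pairs : List (String × String)) (window : Int) (out : List String) : Decidable (Spec_build_multi_turn_examples pairs window out) := by unfold Spec_build_multi_turn_examples; infer_instance

-- ===== CLAIM (what is proved, stated in full; the proofs are below) =====
def Claim_equal_build_multi_turn_examples : Prop := ∀ (pairs : List (String × String)) (window : Int), Dom_build_multi_turn_examples pairs window → Spec_build_multi_turn_examples pairs window (build_multi_turn_examples pairs window)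

-- ===== LEMMAS AND PROOFS =====

-- foldl that appends a singleton per element is map
theorem pv_foldl_append_singleton {α β : Type} (f : α → β) (l : List α) (init : List β) :
    l.foldl (fun acc x => acc ++ [f x]) init = init ++ l.map f := by
  induction l generalizing init with
  | nil => simp
  | cons a t ih => simp [List.foldl, ih]

-- A's inner two-append foldl builds the flatMap of two-line lists
theorem pv_foldl_two_append (l : List (String × String)) (init : List String) :
    l.foldl (fun acc p => (acc ++ ["对方：" ++ p.1]) ++ ["我：" ++ p.2]) init
      = init ++ l.flatMap (fun p => ["对方：" ++ p.1, "我：" ++ p.2]) := by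
  induction l generalizing init with
  | nil => simp
  | cons a t ih => simp [List.foldl, List.flatMap]

-- slice commutes with map
theorem pv_slice_map {α β : Type} (f : α → β) (xs : List α) (a b : Int) :
    PySem.List.slice (xs.map f) (some a) (some b) = (PySem.List.slice xs (some a) (some b)).map f := by
  simp [PySem.List.slice, PySem.List.clampIdx, List.map_drop, List.map_take]

-- joining the two-line flatMap equals joining the merged per-pair blocks (List Char level)
theorem pv_chars_join_pairs (sep : List Char) (f g : String × String → List Char) (l : List (String × String)) :
    PySem.Chars.join sep (l.flatMap (fun p => [f p, g p]))
      = PySem.Chars.join sep (l.map (fun p => f p ++ sep ++ g p)) := by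
  induction l with
  | nil => rfl
  | cons a t ih =>
      cases t with
      | nil =>
          simp [PySem.Chars.join_cons_cons, PySem.Chars.join_singleton]
      | cons b t' =>
          simp only [List.flatMap_cons, List.map_cons, List.cons_append, List.nil_append] at ih ⊢
          rw [PySem.Chars.join_cons_cons, PySem.Chars.join_cons_cons, ih,
            PySem.Chars.join_cons_cons]
          simp [List.append_assoc]

-- lifted to Str.join on the actual line strings
theorem pv_join_pairs (l : List (String × String)) :
    PySem.Str.join "\n" (l.flatMap (fun p => ["对方：" ++ p.1, "我：" ++ p.2]))
      = PySem.Str.join "\n" (l.map (fun p => "对方：" ++ p.1 ++ "\n我：" ++ p.2)) := by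
  apply String.toList_inj.mp
  have h := pv_chars_join_pairs "\n".toList (fun p => ("对方：" ++ p.1).toList) (fun p => ("我：" ++ p.2).toList) l
  simp [PySem.Str.toList_join, List.map_flatMap] at h ⊢
  convert h using 2
  simp

-- ===== VERDICT (by name: the statement is the Claim_ definition above) =====
theorem build_multi_turn_examples_spec : Claim_equal_build_multi_turn_examples := by
  intro pairs window _
  unfold Spec_build_multi_turn_examples build_multi_turn_examples build_multi_turn_examples_alt
  by_cases h : (pairs.length : Int) - window + 1 ≤ 0
  · simp [h, PySem.List.pyRange_one_eq_nil (by omega : (pairs.length : Int) - window + 1 ≤ 0)]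
  · simp only [if_neg h]
    rw [pv_foldl_append_singleton]
    simp only [List.nil_append]
    apply List.map_congr_left
    intro i _
    rw [pv_foldl_two_append]
    simp only [List.nil_append]
    rw [pv_slice_map, pv_join_pairs]
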